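-- pv_equiv track=rewrite | github.com/jmhee28/Coding-Test | 프로그래머스/2/389480. 완전범죄/완전범죄.py | solution
-- ===== SOURCE A (Python) =====
-- def solution(info, n, m):
--     answer = 0
--     k = len(info)
--     dp = [[n for _ in range(m)] for _ in range(k+1)]
--     dp[0][0] = 0
--     for i in range(1, k+1):
--         ascore = info[i-1][0]
--         bscore = info[i-1][1]
--         for j in range(m):
--             dp[i][j] = min(dp[i][j], dp[i-1][j] + ascore)
--             if j + bscore < m:
--                 dp[i][j + bscore] = min(dp[i][j + bscore], dp[i-1][j])
--     answer = n
--     for j in range(m):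
--         answer = min(answer, dp[k][j])
--     if answer >= n:
--         return -1
--     return answer
-- ===== SOURCE B (Python) =====
-- def solution(info, n, m):
--     # Backward suffix DP over one rolling row: f[j] = least A-score needed to
--     # process the remaining crimes when the B-score accumulated so far is j.
--     f = [0] * m
--     for row in reversed(info):
--         a, b = row[0], row[1]
--         f = [min(a + f[j], f[j + b]) if j + b < m else a + f[j] for j in range(m)]
--     answer = f[0]
--     return -1 if answer >= n else answer
-- ===== Notes on version B (the rewrite author's own statement) =====
-- stated objective: alternative
-- what changed: Replaces the forward (k+1)xm DP table with push-style writes and a final row scan by a backward suffix DP over a single rolling row f[j] (least remaining A-score from accumulated B-score j), answer f[0]; Pre_ excludes inputs where A raises IndexError (m <= 0, a row shorter than 2, a b-score below -m) and rows with a negative a-score, which lie outside the problem's natural domain and where A's result can come from its n-initialised table cells.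
-- outside the precondition, e.g. on solution([[-2, -2]], -3, 2): A returns -5, B returns -1
import Mathlib
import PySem

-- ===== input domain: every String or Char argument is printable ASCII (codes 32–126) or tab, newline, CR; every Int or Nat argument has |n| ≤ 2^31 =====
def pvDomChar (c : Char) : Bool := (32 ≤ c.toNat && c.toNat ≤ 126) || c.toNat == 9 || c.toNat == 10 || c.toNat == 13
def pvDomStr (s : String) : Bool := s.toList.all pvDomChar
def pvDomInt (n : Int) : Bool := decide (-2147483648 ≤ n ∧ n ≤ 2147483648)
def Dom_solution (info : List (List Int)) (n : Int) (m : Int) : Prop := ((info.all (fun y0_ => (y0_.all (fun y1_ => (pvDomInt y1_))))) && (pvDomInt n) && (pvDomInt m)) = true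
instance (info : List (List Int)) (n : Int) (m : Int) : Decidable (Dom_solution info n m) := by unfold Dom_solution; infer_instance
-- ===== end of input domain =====

-- B replaces A's forward (k+1)×m DP table (push-style writes, final row scan) by a backward
-- suffix DP over one rolling row with answer f[0]: a different decomposition, O(m) extra space.
-- ===== PORT A =====
-- A-side helpers: dp[i][j] reads/writes with Python index semantics (negative index wraps;
-- pyGetD's default / pySetD's no-op correspond to IndexError and are unreachable under Pre_).
def dpGet (dp : List (List Int)) (i j : Int) : Int :=
  PySem.List.pyGetD (PySem.List.pyGetD dp i []) j 0

def dpSet (dp : List (List Int)) (i j : Int) (v : Int) : List (List Int) :=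
  PySem.List.pySetD dp i (PySem.List.pySetD (PySem.List.pyGetD dp i []) j v)

-- body of the inner 'for j in range(m)' loop of A
def innerStep (m i a b : Int) (dp : List (List Int)) (j : Int) : List (List Int) :=
  let dp1 := dpSet dp i j (min (dpGet dp i j) (dpGet dp (i-1) j + a))
  if j + b < m then
    dpSet dp1 i (j + b) (min (dpGet dp1 i (j + b)) (dpGet dp1 (i-1) j))
  else dp1

-- body of the outer 'for i in range(1, k+1)' loop of A
def outerStep (info : List (List Int)) (m : Int) (dp : List (List Int)) (i : Int) : List (List Int) :=
  let ascore := dpGet info (i-1) 0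
  let bscore := dpGet info (i-1) 1
  (PySem.List.pyRange 0 m 1).foldl (innerStep m i ascore bscore) dp

def solution (info : List (List Int)) (n : Int) (m : Int) : Int :=
  let k : Int := (info.length : Int)
  let dp0 : List (List Int) :=
    (PySem.List.pyRange 0 (k+1) 1).map (fun _ => (PySem.List.pyRange 0 m 1).map (fun _ => n))
  let dp1 := dpSet dp0 0 0 0
  let dp2 := (PySem.List.pyRange 1 (k+1) 1).foldl (outerStep info m) dp1
  let answer := (PySem.List.pyRange 0 m 1).foldl (fun answer j => min answer (dpGet dp2 k j)) n
  if answer ≥ n then -1 else answer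

-- ===== PORT B =====
-- B-side helper: body of 'for row in reversed(info)' — rebuilds the rolling row f.
-- List reads use pyGetD (Python indexing; its default stands for IndexError, unreachable under Pre_).
def altStep (m : Int) (f : List Int) (row : List Int) : List Int :=
  let a := PySem.List.pyGetD row 0 0
  let b := PySem.List.pyGetD row 1 0
  (PySem.List.pyRange 0 m 1).map (fun j =>
    if j + b < m then min (a + PySem.List.pyGetD f j 0) (PySem.List.pyGetD f (j + b) 0)
    else a + PySem.List.pyGetD f j 0)

def solution_alt (info : List (List Int)) (n : Int) (m : Int) : Int :=
  let f := info.reverse.foldl (altStep m) (List.replicate m.toNat 0)   -- [0] * m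
  let answer := PySem.List.pyGetD f 0 0                               -- f[0]; IndexError for m ≤ 0 is outside Pre_
  if answer ≥ n then -1 else answer

-- ===== PRECONDITION & SPEC =====
-- Pre_ is A's crash-free domain minus negative a-scores: A raises IndexError when m ≤ 0
-- (empty dp rows), when a row has fewer than two entries, or when a b-score is below -m
-- (dp index past the left end); and a negative a-score lies outside the problem's natural
-- domain — there A's result can come from its n-initialised table cells (see claim cites).
def Pre_solution (info : List (List Int)) (n : Int) (m : Int) : Prop :=
  0 < m ∧ ∀ r ∈ info, 2 ≤ r.length ∧ 0 ≤ r.getD 0 0 ∧ -m ≤ r.getD 1 0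

instance (info : List (List Int)) (n : Int) (m : Int) : Decidable (Pre_solution info n m) := by
  unfold Pre_solution; infer_instance

def pvWitness_solution : List (List Int) × Int × Int := ([[3, 1], [2, 2]], 4, 3)

def Spec_solution (info : List (List Int)) (n : Int) (m : Int) (out : Int) : Prop :=
  out = solution_alt info n m
instance (info : List (List Int)) (n : Int) (m : Int) (out : Int) : Decidable (Spec_solution info n m out) := by
  unfold Spec_solution; infer_instance

-- ===== CLAIM (what is proved, stated in full; the proofs are below) =====
def Claim_equal_solution : Prop := ∀ (info : List (List Int)) (n : Int) (m : Int), Dom_solution info n m → Pre_solution info n m → Spec_solution info n m (solution info n m)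


-- ===== LEMMAS AND PROOFS =====

theorem modw (m w : Int) (hm : 0 < m) (h1 : -m ≤ w) (h2 : w < m) :
    PySem.Int.mod w m = if 0 ≤ w then w else w + m := by
  rw [PySem.Int.mod_eq_emod_of_pos hm]
  split
  · exact Int.emod_eq_of_lt (by omega) (by omega)
  · have h3 : (w + m * 1) % m = w % m := Int.add_mul_emod_self_left w m 1
    have h4 : (w + m) % m = w + m := Int.emod_eq_of_lt (by omega) (by omega)
    rw [mul_one] at h3; omega

theorem mod_id (m w : Int) (hm : 0 < m) (h1 : 0 ≤ w) (h2 : w < m) :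
    PySem.Int.mod w m = w := by rw [modw m w hm (by omega) h2, if_pos h1]

theorem idxw (m w : Int) (M : Nat) (hM : (M : Int) = m) (hm : 0 < m) (h1 : -m ≤ w) (h2 : w < m) :
    PySem.List.pyIdx? M w = some (PySem.Int.mod w m).toNat := by
  rw [modw m w hm h1 h2]
  unfold PySem.List.pyIdx?
  split
  · rw [if_pos (by omega)]
  · rw [if_pos (by omega)]
    congr 1; omega

theorem getDw (r : List Int) (m w : Int) (hM : ((r.length : Nat) : Int) = m) (hm : 0 < m)
    (h1 : -m ≤ w) (h2 : w < m) :
    PySem.List.pyGetD r w 0 = r.getD (PySem.Int.mod w m).toNat 0 := by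
  unfold PySem.List.pyGetD PySem.List.pyGet?
  rw [idxw m w r.length hM hm h1 h2]
  rfl

theorem setDw (r : List Int) (m w : Int) (v : Int) (hM : ((r.length : Nat) : Int) = m) (hm : 0 < m)
    (h1 : -m ≤ w) (h2 : w < m) :
    PySem.List.pySetD r w v = r.set (PySem.Int.mod w m).toNat v := by
  unfold PySem.List.pySetD PySem.List.pySet?
  rw [idxw m w r.length hM hm h1 h2]
  rfl

theorem getD_set_eq (r : List Int) (a b : Nat) (v : Int) (ha : a < r.length) :
    (r.set a v).getD b 0 = if b = a then v else r.getD b 0 := by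
  simp only [List.getD, List.getElem?_set]
  rcases eq_or_ne a b with h | h
  · subst h; simp [ha]
  · simp [h, Ne.symm h]

theorem dp_row (dp : List (List Int)) (i s : Int) (row : List Int)
    (h0 : 0 ≤ i) (h1 : i < (dp.length : Int)) (hs : 0 ≤ s) :
    PySem.List.pyGetD (PySem.List.pySetD dp i row) s [] =
      if s = i then row else PySem.List.pyGetD dp s [] := by
  rw [PySem.List.pySetD_of_nonneg dp row h0, PySem.List.pyGetD_of_nonneg _ _ hs,
      PySem.List.pyGetD_of_nonneg _ _ hs]
  simp only [List.getD, List.getElem?_set]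
  rcases eq_or_ne s i with h | h
  · simp [h, show i.toNat < dp.length by omega]
  · rw [if_neg (by omega), if_neg h]

theorem row_mem (dp : List (List Int)) (i : Int) (h0 : 0 ≤ i) (h1 : i < (dp.length : Int)) :
    PySem.List.pyGetD dp i [] ∈ dp := by
  rw [PySem.List.pyGetD_of_nonneg _ _ h0, List.getD,
      List.getElem?_eq_getElem (by omega), Option.getD_some]
  exact List.getElem_mem _

theorem cell_wrap (r : List Int) (m w : Int) (hM : ((r.length : Nat) : Int) = m) (hm : 0 < m)
    (h1 : -m ≤ w) (h2 : w < m) :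
    PySem.List.pyGetD r w 0 = PySem.List.pyGetD r (PySem.Int.mod w m) 0 := by
  have hb1 := PySem.Int.mod_nonneg w hm
  have hb2 := PySem.Int.mod_lt w hm
  rw [getDw r m w hM hm h1 h2, getDw r m _ hM hm (by omega) hb2,
      mod_id m _ hm hb1 hb2]

theorem cell_set (cur : List Int) (m w x v : Int) (hM : ((cur.length : Nat) : Int) = m)
    (hm : 0 < m) (hw1 : -m ≤ w) (hw2 : w < m) (hx1 : 0 ≤ x) (hx2 : x < m) :
    PySem.List.pyGetD (PySem.List.pySetD cur w v) x 0 =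
      if x = PySem.Int.mod w m then v else PySem.List.pyGetD cur x 0 := by
  have hb1 := PySem.Int.mod_nonneg w hm
  have hb2 := PySem.Int.mod_lt w hm
  have hlen : (((cur.set (PySem.Int.mod w m).toNat v).length : Nat) : Int) = m := by
    rw [List.length_set]; exact hM
  rw [setDw cur m w v hM hm hw1 hw2,
      getDw _ m x hlen hm (by omega) hx2, mod_id m x hm hx1 hx2,
      getD_set_eq _ _ _ _ (by omega),
      getDw cur m x hM hm (by omega) hx2, mod_id m x hm hx1 hx2]
  by_cases h : x = PySem.Int.mod w m
  · rw [if_pos (by omega), if_pos h]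
  · rw [if_neg (by omega), if_neg h]

theorem dpSet_len (dp : List (List Int)) (i j v : Int) : (dpSet dp i j v).length = dp.length := by
  unfold dpSet; exact PySem.List.length_pySetD ..

theorem dpSet_row (dp : List (List Int)) (i s j v : Int)
    (h0 : 0 ≤ i) (h1 : i < (dp.length : Int)) (hs : 0 ≤ s) :
    PySem.List.pyGetD (dpSet dp i j v) s [] =
      if s = i then PySem.List.pySetD (PySem.List.pyGetD dp i []) j v
      else PySem.List.pyGetD dp s [] := by
  unfold dpSet; exact dp_row dp i s _ h0 h1 hs

theorem dpSet_rows_len (dp : List (List Int)) (i j v : Int) (M : Nat)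
    (h0 : 0 ≤ i) (h1 : i < (dp.length : Int)) (hrows : ∀ r ∈ dp, r.length = M) :
    ∀ r ∈ dpSet dp i j v, r.length = M := by
  intro r hr
  unfold dpSet at hr
  rw [PySem.List.pySetD_of_nonneg _ _ h0] at hr
  rcases List.mem_or_eq_of_mem_set hr with h | h
  · exact hrows _ h
  · rw [h, PySem.List.length_pySetD]
    exact hrows _ (row_mem dp i h0 h1)

theorem step_facts (m a b i : Int) (prev : List Int) (M : Nat) (hM : (M : Int) = m)
    (hm : 0 < m) (hb : -m ≤ b) (hi : 1 ≤ i) (j : Int) (hj : 0 ≤ j) (hj2 : j < m)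
    (dp : List (List Int)) (hlen : i < (dp.length : Int)) (hrows : ∀ r ∈ dp, r.length = M)
    (hprev : PySem.List.pyGetD dp (i-1) [] = prev) :
    (innerStep m i a b dp j).length = dp.length ∧
    (∀ r ∈ innerStep m i a b dp j, r.length = M) ∧
    (∀ s : Int, 0 ≤ s → s ≠ i →
      PySem.List.pyGetD (innerStep m i a b dp j) s [] = PySem.List.pyGetD dp s []) ∧
    (∀ x : Int, 0 ≤ x → x < m →
      PySem.List.pyGetD (PySem.List.pyGetD (innerStep m i a b dp j) i []) x 0 ≤
        PySem.List.pyGetD (PySem.List.pyGetD dp i []) x 0) ∧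
    (∀ x : Int, 0 ≤ x → x < m →
      PySem.List.pyGetD (PySem.List.pyGetD (innerStep m i a b dp j) i []) x 0 =
        PySem.List.pyGetD (PySem.List.pyGetD dp i []) x 0 ∨
      PySem.List.pyGetD (PySem.List.pyGetD (innerStep m i a b dp j) i []) x 0 =
        PySem.List.pyGetD prev x 0 + a ∨
      ∃ j0 : Int, 0 ≤ j0 ∧ j0 < m ∧ j0 + b < m ∧ PySem.Int.mod (j0 + b) m = x ∧
        PySem.List.pyGetD (PySem.List.pyGetD (innerStep m i a b dp j) i []) x 0 =
          PySem.List.pyGetD prev j0 0) ∧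
    (PySem.List.pyGetD (PySem.List.pyGetD (innerStep m i a b dp j) i []) j 0 ≤
      PySem.List.pyGetD prev j 0 + a) ∧
    (j + b < m →
      PySem.List.pyGetD (PySem.List.pyGetD (innerStep m i a b dp j) i [])
          (PySem.Int.mod (j + b) m) 0 ≤ PySem.List.pyGetD prev j 0) := by
  have hi0 : (0:Int) ≤ i := by omega
  have hcur_mem := row_mem dp i hi0 hlen
  have hcurlen : ((PySem.List.pyGetD dp i []).length : Int) = m := by
    rw [hrows _ hcur_mem]; exact hM
  set cur := PySem.List.pyGetD dp i [] with hcur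
  -- value written first
  set v1 := min (dpGet dp i j) (dpGet dp (i-1) j + a) with hv1
  set r1 := PySem.List.pySetD cur j v1 with hr1
  have hr1len : ((r1.length : Nat) : Int) = m := by
    rw [hr1, PySem.List.length_pySetD]; exact hcurlen
  have hdp1rows : ∀ s : Int, 0 ≤ s →
      PySem.List.pyGetD (dpSet dp i j v1) s [] = if s = i then r1 else PySem.List.pyGetD dp s [] := by
    intro s hs
    rw [dpSet_row dp i s j v1 hi0 hlen hs, ← hcur, ← hr1]
  have hdp1len : (dpSet dp i j v1).length = dp.length := dpSet_len ..
  have hdp1mem : ∀ r ∈ dpSet dp i j v1, r.length = M :=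
    dpSet_rows_len dp i j v1 M hi0 hlen hrows
  -- cell values of r1
  have hr1cell : ∀ x : Int, 0 ≤ x → x < m →
      PySem.List.pyGetD r1 x 0 = if x = j then v1 else PySem.List.pyGetD cur x 0 := by
    intro x hx1 hx2
    rw [hr1, cell_set cur m j x v1 hcurlen hm (by omega) hj2 hx1 hx2, mod_id m j hm hj hj2]
  have hv1le : v1 ≤ PySem.List.pyGetD cur j 0 := by
    rw [hv1]; exact min_le_left _ _
  have hv1le2 : v1 ≤ PySem.List.pyGetD prev j 0 + a := by
    rw [hv1]
    have : dpGet dp (i-1) j = PySem.List.pyGetD prev j 0 := by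
      unfold dpGet; rw [hprev]
    rw [← this]
    exact min_le_right _ _
  have hv1cases : v1 = PySem.List.pyGetD cur j 0 ∨ v1 = PySem.List.pyGetD prev j 0 + a := by
    have : dpGet dp (i-1) j = PySem.List.pyGetD prev j 0 := by unfold dpGet; rw [hprev]
    rcases min_choice (dpGet dp i j) (dpGet dp (i-1) j + a) with h | h
    · left; rw [hv1, h]; rfl
    · right; rw [hv1, h, this]
  by_cases hg : j + b < m
  · -- second write
    have hstep : innerStep m i a b dp j =
        dpSet (dpSet dp i j v1) i (j + b)
          (min (dpGet (dpSet dp i j v1) i (j + b)) (dpGet (dpSet dp i j v1) (i-1) j)) := by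
      unfold innerStep
      rw [if_pos hg]
    have hw1 : -m ≤ j + b := by omega
    have hget1 : dpGet (dpSet dp i j v1) i (j + b) = PySem.List.pyGetD r1 (j + b) 0 := by
      unfold dpGet; rw [hdp1rows i hi0, if_pos rfl]
    have hget2 : dpGet (dpSet dp i j v1) (i-1) j = PySem.List.pyGetD prev j 0 := by
      unfold dpGet; rw [hdp1rows (i-1) (by omega), if_neg (by omega), hprev]
    set v2 := min (PySem.List.pyGetD r1 (j + b) 0) (PySem.List.pyGetD prev j 0) with hv2
    rw [hstep, hget1, hget2]
    have hlen1 : i < ((dpSet dp i j v1).length : Int) := by rw [hdp1len]; exact hlen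
    have hDrows : ∀ s : Int, 0 ≤ s →
        PySem.List.pyGetD (dpSet (dpSet dp i j v1) i (j+b) v2) s [] =
          if s = i then PySem.List.pySetD r1 (j+b) v2 else PySem.List.pyGetD dp s [] := by
      intro s hs
      rw [dpSet_row _ i s _ _ hi0 hlen1 hs]
      rcases eq_or_ne s i with h | h
      · rw [if_pos h, if_pos h, hdp1rows i hi0, if_pos rfl]
      · rw [if_neg h, if_neg h, hdp1rows s hs, if_neg h]
    have hrowD : PySem.List.pyGetD (dpSet (dpSet dp i j v1) i (j+b) v2) i [] =
        PySem.List.pySetD r1 (j+b) v2 := by rw [hDrows i hi0, if_pos rfl]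
    have hmodb1 := PySem.Int.mod_nonneg (j+b) hm
    have hmodb2 := PySem.Int.mod_lt (j+b) hm
    have hDcell : ∀ x : Int, 0 ≤ x → x < m →
        PySem.List.pyGetD (PySem.List.pySetD r1 (j+b) v2) x 0 =
          if x = PySem.Int.mod (j+b) m then v2 else PySem.List.pyGetD r1 x 0 :=
      fun x hx1 hx2 => cell_set r1 m (j+b) x v2 hr1len hm hw1 hg hx1 hx2
    have hv2le : v2 ≤ PySem.List.pyGetD r1 (PySem.Int.mod (j+b) m) 0 := by
      rw [hv2, ← cell_wrap r1 m (j+b) hr1len hm hw1 hg]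
      exact min_le_left _ _
    refine ⟨?_, ?_, ?_, ?_, ?_, ?_, ?_⟩
    · rw [dpSet_len, hdp1len]
    · exact dpSet_rows_len _ i (j+b) v2 M hi0 hlen1 hdp1mem
    · intro s hs hne
      rw [hDrows s hs, if_neg hne]
    · intro x hx1 hx2
      rw [hrowD, hDcell x hx1 hx2, hr1cell x hx1 hx2]
      by_cases h1 : x = PySem.Int.mod (j+b) m
      · rw [if_pos h1]
        calc v2 ≤ PySem.List.pyGetD r1 (PySem.Int.mod (j+b) m) 0 := hv2le
          _ = PySem.List.pyGetD r1 x 0 := by rw [h1]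
          _ ≤ _ := by
              rw [hr1cell x hx1 hx2]
              by_cases h2 : x = j
              · rw [if_pos h2, h2]; exact hv1le
              · rw [if_neg h2]
      · rw [if_neg h1]
        by_cases h2 : x = j
        · rw [if_pos h2, h2]; exact hv1le
        · rw [if_neg h2]
    · intro x hx1 hx2
      rw [hrowD, hDcell x hx1 hx2]
      by_cases h1 : x = PySem.Int.mod (j+b) m
      · rw [if_pos h1]
        rcases min_choice (PySem.List.pyGetD r1 (j + b) 0) (PySem.List.pyGetD prev j 0) with h | h
        · rw [hv2, h, cell_wrap r1 m (j+b) hr1len hm hw1 hg, ← h1, hr1cell x hx1 hx2]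
          by_cases h2 : x = j
          · rw [if_pos h2]
            rcases hv1cases with h3 | h3
            · left; rw [h3, h2]
            · right; left; rw [h3, h2]
          · rw [if_neg h2]; left; rfl
        · right; right
          exact ⟨j, hj, hj2, hg, h1.symm, by rw [hv2, h]⟩
      · rw [if_neg h1, hr1cell x hx1 hx2]
        by_cases h2 : x = j
        · rw [if_pos h2]
          rcases hv1cases with h3 | h3
          · left; rw [h3, h2]
          · right; left; rw [h3, h2]
        · rw [if_neg h2]; left; rfl
    · rw [hrowD, hDcell j hj hj2]
      by_cases h1 : j = PySem.Int.mod (j+b) m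
      · rw [if_pos h1, hv2]
        calc min (PySem.List.pyGetD r1 (j + b) 0) (PySem.List.pyGetD prev j 0)
            ≤ PySem.List.pyGetD r1 (j+b) 0 := min_le_left _ _
          _ = PySem.List.pyGetD r1 (PySem.Int.mod (j+b) m) 0 := cell_wrap r1 m (j+b) hr1len hm hw1 hg
          _ = PySem.List.pyGetD r1 j 0 := by rw [← h1]
          _ = v1 := by rw [hr1cell j hj hj2, if_pos rfl]
          _ ≤ _ := hv1le2
      · rw [if_neg h1, hr1cell j hj hj2, if_pos rfl]
        exact hv1le2
    · intro _
      rw [hrowD, hDcell _ hmodb1 hmodb2, if_pos rfl, hv2]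
      exact min_le_right _ _
  · have hstep : innerStep m i a b dp j = dpSet dp i j v1 := by
      unfold innerStep
      rw [if_neg hg]
    rw [hstep]
    refine ⟨hdp1len, hdp1mem, ?_, ?_, ?_, ?_, ?_⟩
    · intro s hs hne
      rw [hdp1rows s hs, if_neg hne]
    · intro x hx1 hx2
      rw [hdp1rows i hi0, if_pos rfl, hr1cell x hx1 hx2]
      by_cases h2 : x = j
      · rw [if_pos h2, h2]; exact hv1le
      · rw [if_neg h2]
    · intro x hx1 hx2
      rw [hdp1rows i hi0, if_pos rfl, hr1cell x hx1 hx2]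
      by_cases h2 : x = j
      · rw [if_pos h2]
        rcases hv1cases with h3 | h3
        · left; rw [h3, h2]
        · right; left; rw [h3, h2]
      · rw [if_neg h2]; left; rfl
    · rw [hdp1rows i hi0, if_pos rfl, hr1cell j hj hj2, if_pos rfl]
      exact hv1le2
    · intro hgg; exact absurd hgg hg

theorem inner_aux (m a b i : Int) (prev : List Int) (M : Nat) (hM : (M : Int) = m)
    (hm : 0 < m) (hb : -m ≤ b) (hi : 1 ≤ i) :
    ∀ (l : List Int), (∀ j ∈ l, 0 ≤ j ∧ j < m) →
    ∀ (dp : List (List Int)), i < (dp.length : Int) → (∀ r ∈ dp, r.length = M) →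
      PySem.List.pyGetD dp (i-1) [] = prev →
      (l.foldl (innerStep m i a b) dp).length = dp.length ∧
      (∀ r ∈ l.foldl (innerStep m i a b) dp, r.length = M) ∧
      (∀ s : Int, 0 ≤ s → s ≠ i →
        PySem.List.pyGetD (l.foldl (innerStep m i a b) dp) s [] = PySem.List.pyGetD dp s []) ∧
      (∀ x : Int, 0 ≤ x → x < m →
        PySem.List.pyGetD (PySem.List.pyGetD (l.foldl (innerStep m i a b) dp) i []) x 0 ≤
          PySem.List.pyGetD (PySem.List.pyGetD dp i []) x 0) ∧
      (∀ x : Int, 0 ≤ x → x < m →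
        PySem.List.pyGetD (PySem.List.pyGetD (l.foldl (innerStep m i a b) dp) i []) x 0 =
          PySem.List.pyGetD (PySem.List.pyGetD dp i []) x 0 ∨
        PySem.List.pyGetD (PySem.List.pyGetD (l.foldl (innerStep m i a b) dp) i []) x 0 =
          PySem.List.pyGetD prev x 0 + a ∨
        ∃ j0 : Int, 0 ≤ j0 ∧ j0 < m ∧ j0 + b < m ∧ PySem.Int.mod (j0 + b) m = x ∧
          PySem.List.pyGetD (PySem.List.pyGetD (l.foldl (innerStep m i a b) dp) i []) x 0 =
            PySem.List.pyGetD prev j0 0) ∧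
      (∀ j ∈ l,
        PySem.List.pyGetD (PySem.List.pyGetD (l.foldl (innerStep m i a b) dp) i []) j 0 ≤
          PySem.List.pyGetD prev j 0 + a ∧
        (j + b < m →
          PySem.List.pyGetD (PySem.List.pyGetD (l.foldl (innerStep m i a b) dp) i [])
            (PySem.Int.mod (j + b) m) 0 ≤ PySem.List.pyGetD prev j 0)) := by
  intro l
  induction l with
  | nil =>
      intro _ dp hlen hrows hprev
      refine ⟨rfl, hrows, fun s _ _ => rfl, fun x _ _ => le_refl _, fun x hx1 hx2 => Or.inl rfl,
        fun j hj => absurd hj (List.not_mem_nil)⟩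
  | cons j l ih =>
      intro hjs dp hlen hrows hprev
      obtain ⟨hj, hj2⟩ := hjs j (List.mem_cons_self)
      obtain ⟨s1, s2, s3, s4, s5, s6, s7⟩ :=
        step_facts m a b i prev M hM hm hb hi j hj hj2 dp hlen hrows hprev
      have hprev' : PySem.List.pyGetD (innerStep m i a b dp j) (i-1) [] = prev := by
        rw [s3 (i-1) (by omega) (by omega)]; exact hprev
      obtain ⟨t1, t2, t3, t4, t5, t6⟩ :=
        ih (fun x hx => hjs x (List.mem_cons_of_mem _ hx)) (innerStep m i a b dp j)
          (by rw [s1]; exact_mod_cast hlen) s2 hprev'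
      rw [List.foldl_cons]
      refine ⟨by rw [t1, s1], t2, ?_, ?_, ?_, ?_⟩
      · intro s hs hne
        rw [t3 s hs hne, s3 s hs hne]
      · intro x hx1 hx2
        exact le_trans (t4 x hx1 hx2) (s4 x hx1 hx2)
      · intro x hx1 hx2
        rcases t5 x hx1 hx2 with h | h | h
        · rw [h]
          exact s5 x hx1 hx2
        · exact Or.inr (Or.inl h)
        · exact Or.inr (Or.inr h)
      · intro j' hj'
        rcases List.mem_cons.mp hj' with h | h
        · subst h
          constructor
          · exact le_trans (t4 j' hj hj2) s6
          · intro hg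
            have hmb1 := PySem.Int.mod_nonneg (j' + b) hm
            have hmb2 := PySem.Int.mod_lt (j' + b) hm
            exact le_trans (t4 _ (by omega) hmb2) (s7 hg)
        · exact t6 j' h
-- suffix DP function: least A-score for the remaining rows from B-total j (B's f, as a function)
def Fsuf (m : Int) : List (List Int) → Int → Int
  | [], _ => 0
  | row :: rest, j =>
    if j + PySem.List.pyGetD row 1 0 < m then
      min (PySem.List.pyGetD row 0 0 + Fsuf m rest j)
          (Fsuf m rest (PySem.Int.mod (j + PySem.List.pyGetD row 1 0) m))
    else PySem.List.pyGetD row 0 0 + Fsuf m rest j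

-- best value reachable from the table's n-initialised cells of levels 1..k (A's caps)
def PH (n m : Int) : List (List Int) → Int
  | [] => n
  | _ :: rest =>
    ((PySem.List.pyRange 0 m 1).map (fun j => n + Fsuf m rest j)).foldl min (PH n m rest)

-- what one outer iteration of A does to the working row (prev = row i-1, cur = row i)
def RowRel (n m a b : Int) (prev cur : List Int) : Prop :=
  cur.length = m.toNat ∧
  (∀ x : Int, 0 ≤ x → x < m → PySem.List.pyGetD cur x 0 ≤ n) ∧
  (∀ x : Int, 0 ≤ x → x < m →
      PySem.List.pyGetD cur x 0 ≤ PySem.List.pyGetD prev x 0 + a) ∧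
  (∀ j : Int, 0 ≤ j → j < m → j + b < m →
      PySem.List.pyGetD cur (PySem.Int.mod (j + b) m) 0 ≤ PySem.List.pyGetD prev j 0) ∧
  (∀ x : Int, 0 ≤ x → x < m →
      PySem.List.pyGetD cur x 0 = n ∨
      PySem.List.pyGetD cur x 0 = PySem.List.pyGetD prev x 0 + a ∨
      ∃ j : Int, 0 ≤ j ∧ j < m ∧ j + b < m ∧ PySem.Int.mod (j + b) m = x ∧
        PySem.List.pyGetD cur x 0 = PySem.List.pyGetD prev j 0)

def Chain (n m : Int) : List (List Int) → List Int → List Int → Prop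
  | [], r, r' => r' = r
  | row :: rest, r, r'' =>
    ∃ r', RowRel n m (PySem.List.pyGetD row 0 0) (PySem.List.pyGetD row 1 0) r r' ∧
      Chain n m rest r' r''

theorem inner_lemma (n m a b i : Int) (dp : List (List Int)) (prev : List Int) (M : Nat)
    (hM : (M : Int) = m) (hm : 0 < m) (hb : -m ≤ b) (hi : 1 ≤ i)
    (hilen : i < (dp.length : Int)) (hrows : ∀ r ∈ dp, r.length = M)
    (hprev : PySem.List.pyGetD dp (i-1) [] = prev)
    (hinit : ∀ x : Int, 0 ≤ x → x < m →
        PySem.List.pyGetD (PySem.List.pyGetD dp i []) x 0 = n) :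
    ((PySem.List.pyRange 0 m 1).foldl (innerStep m i a b) dp).length = dp.length ∧
    (∀ r ∈ (PySem.List.pyRange 0 m 1).foldl (innerStep m i a b) dp, r.length = M) ∧
    (∀ s : Int, 0 ≤ s → s ≠ i →
      PySem.List.pyGetD ((PySem.List.pyRange 0 m 1).foldl (innerStep m i a b) dp) s [] =
        PySem.List.pyGetD dp s []) ∧
    RowRel n m a b prev
      (PySem.List.pyGetD ((PySem.List.pyRange 0 m 1).foldl (innerStep m i a b) dp) i []) := by
  have hmem : ∀ j ∈ PySem.List.pyRange 0 m 1, 0 ≤ j ∧ j < m := by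
    intro j hj
    exact (PySem.List.mem_pyRange_one).mp hj
  obtain ⟨t1, t2, t3, t4, t5, t6⟩ := inner_aux m a b i prev M hM hm hb hi
    (PySem.List.pyRange 0 m 1) hmem dp hilen hrows hprev
  refine ⟨t1, t2, t3, ?_, ?_, ?_, ?_, ?_⟩
  · rw [t2 _ (row_mem _ i (by omega) (by rw [t1] at *; exact_mod_cast hilen))]
    exact hM.symm ▸ rfl
  · intro x hx1 hx2
    rw [← hinit x hx1 hx2]
    exact t4 x hx1 hx2
  · intro x hx1 hx2
    exact (t6 x ((PySem.List.mem_pyRange_one).mpr ⟨hx1, hx2⟩)).1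
  · intro j hj1 hj2 hg
    exact (t6 j ((PySem.List.mem_pyRange_one).mpr ⟨hj1, hj2⟩)).2 hg
  · intro x hx1 hx2
    rcases t5 x hx1 hx2 with h | h | h
    · exact Or.inl (by rw [h, hinit x hx1 hx2])
    · exact Or.inr (Or.inl h)
    · exact Or.inr (Or.inr h)

theorem chain_snoc (n m : Int) (s : List (List Int)) (row : List Int) :
    ∀ (r mid cur : List Int), Chain n m s r mid →
      RowRel n m (PySem.List.pyGetD row 0 0) (PySem.List.pyGetD row 1 0) mid cur →
      Chain n m (s ++ [row]) r cur := by
  induction s with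
  | nil =>
      intro r mid cur hc hr
      rw [show Chain n m [] r mid = (mid = r) from rfl] at hc
      subst hc
      exact ⟨cur, hr, rfl⟩
  | cons x t ih =>
      intro r mid cur hc hr
      obtain ⟨r', hrel, hch⟩ := hc
      exact ⟨r', hrel, ih r' mid cur hch hr⟩

theorem rowN_cell (n m : Int) (x : Int) (hx1 : 0 ≤ x) (hx2 : x < m) :
    PySem.List.pyGetD ((PySem.List.pyRange 0 m 1).map (fun _ => n)) x 0 = n :=
  PySem.List.pyGetD_map_pyRange_of_nonneg (fun _ => n) m x 0 hx1 hx2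

theorem rowN_len (n m : Int) : ((PySem.List.pyRange 0 m 1).map (fun _ => n)).length = m.toNat := by
  rw [List.length_map, PySem.List.length_pyRange_one]
  norm_num

theorem outer_aux (info : List (List Int)) (n m : Int) (M : Nat) (hM : (M : Int) = m)
    (hm : 0 < m) (hrows : ∀ r ∈ info, 2 ≤ r.length ∧ -m ≤ r.getD 1 0) :
    ∀ t : Nat, t ≤ info.length →
      ((PySem.List.pyRange 1 ((t : Int)+1) 1).foldl (outerStep info m)
        (dpSet ((PySem.List.pyRange 0 ((info.length : Int)+1) 1).map
          (fun _ => (PySem.List.pyRange 0 m 1).map (fun _ => n))) 0 0 0)).length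
        = info.length + 1 ∧
      (∀ r ∈ (PySem.List.pyRange 1 ((t : Int)+1) 1).foldl (outerStep info m)
        (dpSet ((PySem.List.pyRange 0 ((info.length : Int)+1) 1).map
          (fun _ => (PySem.List.pyRange 0 m 1).map (fun _ => n))) 0 0 0), r.length = M) ∧
      (∀ s : Int, (t : Int) < s → s ≤ (info.length : Int) →
        PySem.List.pyGetD ((PySem.List.pyRange 1 ((t : Int)+1) 1).foldl (outerStep info m)
          (dpSet ((PySem.List.pyRange 0 ((info.length : Int)+1) 1).map
            (fun _ => (PySem.List.pyRange 0 m 1).map (fun _ => n))) 0 0 0)) s [] =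
          (PySem.List.pyRange 0 m 1).map (fun _ => n)) ∧
      Chain n m (info.take t)
        (PySem.List.pySetD ((PySem.List.pyRange 0 m 1).map (fun _ => n)) 0 0)
        (PySem.List.pyGetD ((PySem.List.pyRange 1 ((t : Int)+1) 1).foldl (outerStep info m)
          (dpSet ((PySem.List.pyRange 0 ((info.length : Int)+1) 1).map
            (fun _ => (PySem.List.pyRange 0 m 1).map (fun _ => n))) 0 0 0)) (t : Int) []) := by
  set rowN := (PySem.List.pyRange 0 m 1).map (fun _ => n) with hrowN
  set dpInit := (PySem.List.pyRange 0 ((info.length : Int)+1) 1).map (fun _ => rowN) with hdpInit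
  have hInitLen : dpInit.length = info.length + 1 := by
    rw [hdpInit, List.length_map, PySem.List.length_pyRange_one]
    omega
  have hInitRow : ∀ s : Int, 0 ≤ s → s ≤ (info.length : Int) →
      PySem.List.pyGetD dpInit s [] = rowN := by
    intro s h1 h2
    rw [hdpInit]
    exact PySem.List.pyGetD_map_pyRange_of_nonneg (fun _ => rowN) _ s [] h1 (by omega)
  have hInitRows : ∀ r ∈ dpInit, r.length = M := by
    intro r hr
    rw [hdpInit] at hr
    obtain ⟨_, _, h⟩ := List.mem_map.mp hr
    rw [← h, hrowN, rowN_len]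
    omega
  set dp1 := dpSet dpInit 0 0 0 with hdp1
  have hdp1len : dp1.length = info.length + 1 := by rw [hdp1, dpSet_len, hInitLen]
  have hdp1rows : ∀ r ∈ dp1, r.length = M :=
    dpSet_rows_len dpInit 0 0 0 M (le_refl _) (by omega) hInitRows
  have hdp1row : ∀ s : Int, 0 ≤ s → s ≤ (info.length : Int) →
      PySem.List.pyGetD dp1 s [] =
        if s = 0 then PySem.List.pySetD rowN 0 0 else rowN := by
    intro s h1 h2
    rw [hdp1, dpSet_row dpInit 0 s 0 0 (le_refl _) (by omega) h1, hInitRow 0 (le_refl _) (by omega)]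
    rcases eq_or_ne s 0 with h | h
    · rw [if_pos h, if_pos h]
    · rw [if_neg h, if_neg h, hInitRow s h1 h2]
  intro t
  induction t with
  | zero =>
      intro _
      rw [show ((0:Nat):Int) + 1 = 1 by norm_num, PySem.List.pyRange_one_eq_nil (le_refl _)]
      refine ⟨hdp1len, hdp1rows, ?_, ?_⟩
      · intro s h1 h2
        rw [List.foldl_nil, hdp1row s (by omega) h2, if_neg (by omega)]
      · rw [List.foldl_nil, List.take_zero, Nat.cast_zero, hdp1row 0 (le_refl _) (by omega), if_pos rfl]
        rfl
  | succ t ih =>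
      intro ht
      obtain ⟨u1, u2, u3, u4⟩ := ih (by omega)
      have hsplit : PySem.List.pyRange 1 (((t+1 : Nat) : Int)+1) 1 =
          PySem.List.pyRange 1 ((t : Int)+1) 1 ++ [(t : Int)+1] := by
        push_cast
        exact PySem.List.pyRange_one_succ_right (by omega)
      rw [hsplit, List.foldl_append, List.foldl_cons, List.foldl_nil]
      set Dt := (PySem.List.pyRange 1 ((t : Int)+1) 1).foldl (outerStep info m) dp1 with hDt
      have hrowt_mem : PySem.List.pyGetD info (t : Int) [] ∈ info := by
        exact row_mem info (t : Int) (by omega) (by exact_mod_cast ht)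
      have hbbound : -m ≤ PySem.List.pyGetD (PySem.List.pyGetD info ((t:Int)+1-1) []) 1 0 := by
        have h1 : ((t:Int)+1-1) = (t : Int) := by omega
        rw [h1, PySem.List.pyGetD_of_nonneg _ _ (by omega : (0:Int) ≤ 1)]
        have := (hrows _ hrowt_mem).2
        simpa using this
      have houter : outerStep info m Dt ((t:Int)+1) =
          (PySem.List.pyRange 0 m 1).foldl
            (innerStep m ((t:Int)+1)
              (PySem.List.pyGetD (PySem.List.pyGetD info ((t:Int)+1-1) []) 0 0)
              (PySem.List.pyGetD (PySem.List.pyGetD info ((t:Int)+1-1) []) 1 0)) Dt := by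
        unfold outerStep dpGet
        rfl
      obtain ⟨w1, w2, w3, w4⟩ := inner_lemma n m
        (PySem.List.pyGetD (PySem.List.pyGetD info ((t:Int)+1-1) []) 0 0)
        (PySem.List.pyGetD (PySem.List.pyGetD info ((t:Int)+1-1) []) 1 0)
        ((t:Int)+1) Dt (PySem.List.pyGetD Dt (t : Int) []) M hM hm hbbound (by omega)
        (by rw [u1]; exact_mod_cast (by omega : (t:Int)+1 < (info.length:Int)+1)) u2
        (by congr 1; omega)
        (by
          intro x hx1 hx2
          rw [u3 ((t:Int)+1) (by omega) (by exact_mod_cast (by omega : t+1 ≤ info.length))]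
          exact rowN_cell n m x hx1 hx2)
      rw [houter]
      refine ⟨by rw [w1, u1], w2, ?_, ?_⟩
      · intro s h1 h2
        rw [w3 s (by omega) (by omega), u3 s (by omega) h2]
      · have htake : info.take (t+1) = info.take t ++ [info[t]] := by
          rw [List.take_succ, List.getElem?_eq_getElem (by omega)]
          rfl
        rw [htake]
        have hrowt_eq : PySem.List.pyGetD info ((t:Int)+1-1) [] = info[t] := by
          have h1 : ((t:Int)+1-1) = (t : Int) := by omega
          rw [h1, PySem.List.pyGetD_of_nonneg _ _ (by omega : (0:Int) ≤ (t:Int))]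
          rw [List.getD, Int.toNat_natCast, List.getElem?_eq_getElem (by omega), Option.getD_some]
          rfl
        have := chain_snoc n m (info.take t) info[t] _ _ _ u4 (by rw [← hrowt_eq]; convert w4 using 2)
        convert this using 2

theorem foldl_min_le_init (l : List Int) (c : Int) : l.foldl min c ≤ c :=
  (PySem.List.foldl_min_le l c).1

theorem foldl_min_le_mem (l : List Int) (c x : Int) (hx : x ∈ l) : l.foldl min c ≤ x :=
  (PySem.List.foldl_min_le l c).2 x hx

theorem le_foldl_min (l : List Int) (c g : Int) (hc : g ≤ c) (h : ∀ x ∈ l, g ≤ x) :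
    g ≤ l.foldl min c := by
  induction l generalizing c with
  | nil => exact hc
  | cons y t ih =>
      exact ih (min c y) (le_min hc (h y (List.mem_cons_self))) fun x hx => h x (List.mem_cons_of_mem _ hx)

theorem Fsuf_cons_le_left (m : Int) (row : List Int) (rest : List (List Int)) (j : Int) :
    Fsuf m (row :: rest) j ≤ PySem.List.pyGetD row 0 0 + Fsuf m rest j := by
  show (if j + PySem.List.pyGetD row 1 0 < m then
      min (PySem.List.pyGetD row 0 0 + Fsuf m rest j)
        (Fsuf m rest (PySem.Int.mod (j + PySem.List.pyGetD row 1 0) m))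
    else PySem.List.pyGetD row 0 0 + Fsuf m rest j) ≤ _
  split
  · exact min_le_left _ _
  · exact le_refl _

theorem Fsuf_cons_le_right (m : Int) (row : List Int) (rest : List (List Int)) (j : Int)
    (hg : j + PySem.List.pyGetD row 1 0 < m) :
    Fsuf m (row :: rest) j ≤ Fsuf m rest (PySem.Int.mod (j + PySem.List.pyGetD row 1 0) m) := by
  show (if j + PySem.List.pyGetD row 1 0 < m then
      min (PySem.List.pyGetD row 0 0 + Fsuf m rest j)
        (Fsuf m rest (PySem.Int.mod (j + PySem.List.pyGetD row 1 0) m))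
    else PySem.List.pyGetD row 0 0 + Fsuf m rest j) ≤ _
  rw [if_pos hg]
  exact min_le_right _ _

theorem Fsuf_cons_cases (m : Int) (row : List Int) (rest : List (List Int)) (j : Int) :
    Fsuf m (row :: rest) j = PySem.List.pyGetD row 0 0 + Fsuf m rest j ∨
    (j + PySem.List.pyGetD row 1 0 < m ∧
      Fsuf m (row :: rest) j = Fsuf m rest (PySem.Int.mod (j + PySem.List.pyGetD row 1 0) m)) := by
  show (if j + PySem.List.pyGetD row 1 0 < m then
      min (PySem.List.pyGetD row 0 0 + Fsuf m rest j)
        (Fsuf m rest (PySem.Int.mod (j + PySem.List.pyGetD row 1 0) m))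
    else PySem.List.pyGetD row 0 0 + Fsuf m rest j) = _ ∨ _ ∧ (if j + PySem.List.pyGetD row 1 0 < m then
      min (PySem.List.pyGetD row 0 0 + Fsuf m rest j)
        (Fsuf m rest (PySem.Int.mod (j + PySem.List.pyGetD row 1 0) m))
    else PySem.List.pyGetD row 0 0 + Fsuf m rest j) = _
  split
  · rcases min_choice (PySem.List.pyGetD row 0 0 + Fsuf m rest j)
      (Fsuf m rest (PySem.Int.mod (j + PySem.List.pyGetD row 1 0) m)) with h | h
    · exact Or.inl h
    · exact Or.inr ⟨by assumption, h⟩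
  · exact Or.inl rfl

theorem mem_J (m x : Int) (h1 : 0 ≤ x) (h2 : x < m) (g : Int → Int) :
    g x ∈ (PySem.List.pyRange 0 m 1).map g :=
  List.mem_map_of_mem (PySem.List.mem_pyRange_one.mpr ⟨h1, h2⟩)

theorem ex_lemma (n m : Int) (hm : 0 < m) :
    ∀ (items : List (List Int)) (r r' : List Int), Chain n m items r r' →
    ((PySem.List.pyRange 0 m 1).map (fun j => PySem.List.pyGetD r' j 0)).foldl min n =
    ((PySem.List.pyRange 0 m 1).map
        (fun j => PySem.List.pyGetD r j 0 + Fsuf m items j)).foldl min (PH n m items) := by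
  intro items
  induction items with
  | nil =>
      intro r r' hch
      rw [show Chain n m [] r r' = (r' = r) from rfl] at hch
      subst hch
      simp only [Fsuf, PH, add_zero]
  | cons row rest ih =>
      intro r r' hch
      obtain ⟨r1, hrel, hch'⟩ := hch
      obtain ⟨hlen1, hc1, hc2, hc3, hc4⟩ := hrel
      rw [ih r1 r' hch']
      have hPHcons : PH n m (row :: rest) =
          ((PySem.List.pyRange 0 m 1).map (fun j => n + Fsuf m rest j)).foldl min (PH n m rest) := rfl
      apply le_antisymm
      · apply le_foldl_min
        · rw [hPHcons]
          apply le_foldl_min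
          · exact foldl_min_le_init _ _
          · intro x hx
            obtain ⟨j, hjmem, rfl⟩ := List.mem_map.mp hx
            obtain ⟨hj1, hj2⟩ := PySem.List.mem_pyRange_one.mp hjmem
            exact le_trans
              (foldl_min_le_mem _ _ _ (mem_J m j hj1 hj2 _))
              (add_le_add (hc1 j hj1 hj2 ) (le_refl _))
        · intro x hx
          obtain ⟨j, hjmem, rfl⟩ := List.mem_map.mp hx
          obtain ⟨hj1, hj2⟩ := PySem.List.mem_pyRange_one.mp hjmem
          rcases Fsuf_cons_cases m row rest j with h | ⟨hg, h⟩
          · rw [h]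
            calc ((PySem.List.pyRange 0 m 1).map
                  (fun j => PySem.List.pyGetD r1 j 0 + Fsuf m rest j)).foldl min (PH n m rest)
                ≤ PySem.List.pyGetD r1 j 0 + Fsuf m rest j :=
                  foldl_min_le_mem _ _ _ (mem_J m j hj1 hj2 _)
              _ ≤ (PySem.List.pyGetD r j 0 + PySem.List.pyGetD row 0 0) + Fsuf m rest j :=
                  add_le_add (hc2 j hj1 hj2 ) (le_refl _)
              _ = PySem.List.pyGetD r j 0 + (PySem.List.pyGetD row 0 0 + Fsuf m rest j) := by ring
          · rw [h]
            have hx0a := PySem.Int.mod_nonneg (j + PySem.List.pyGetD row 1 0) hm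
            have hx0b := PySem.Int.mod_lt (j + PySem.List.pyGetD row 1 0) hm
            calc ((PySem.List.pyRange 0 m 1).map
                  (fun j => PySem.List.pyGetD r1 j 0 + Fsuf m rest j)).foldl min (PH n m rest)
                ≤ PySem.List.pyGetD r1 (PySem.Int.mod (j + PySem.List.pyGetD row 1 0) m) 0 +
                    Fsuf m rest (PySem.Int.mod (j + PySem.List.pyGetD row 1 0) m) :=
                  foldl_min_le_mem _ _ _ (mem_J m _ hx0a hx0b _)
              _ ≤ PySem.List.pyGetD r j 0 +
                    Fsuf m rest (PySem.Int.mod (j + PySem.List.pyGetD row 1 0) m) :=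
                  add_le_add (hc3 j hj1 hj2 hg ) (le_refl _)
      · apply le_foldl_min
        · exact le_trans (foldl_min_le_init _ _) (by rw [hPHcons]; exact foldl_min_le_init _ _)
        · intro x hx
          obtain ⟨j, hjmem, rfl⟩ := List.mem_map.mp hx
          obtain ⟨hj1, hj2⟩ := PySem.List.mem_pyRange_one.mp hjmem
          rcases hc4 j hj1 hj2 with h | h | ⟨j0, hj01, hj02, hg, hmod, heq⟩
          · rw [h]
            exact le_trans (foldl_min_le_init _ _)
              (by rw [hPHcons]; exact foldl_min_le_mem _ _ _ (mem_J m j hj1 hj2 _))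
          · rw [h]
            calc ((PySem.List.pyRange 0 m 1).map
                  (fun j => PySem.List.pyGetD r j 0 + Fsuf m (row :: rest) j)).foldl min
                    (PH n m (row :: rest))
                ≤ PySem.List.pyGetD r j 0 + Fsuf m (row :: rest) j :=
                  foldl_min_le_mem _ _ _ (mem_J m j hj1 hj2 _)
              _ ≤ PySem.List.pyGetD r j 0 + (PySem.List.pyGetD row 0 0 + Fsuf m rest j) :=
                  add_le_add (le_refl _) (Fsuf_cons_le_left m row rest j)
              _ = PySem.List.pyGetD r j 0 + PySem.List.pyGetD row 0 0 + Fsuf m rest j := by ring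
          · rw [heq]
            calc ((PySem.List.pyRange 0 m 1).map
                  (fun j => PySem.List.pyGetD r j 0 + Fsuf m (row :: rest) j)).foldl min
                    (PH n m (row :: rest))
                ≤ PySem.List.pyGetD r j0 0 + Fsuf m (row :: rest) j0 :=
                  foldl_min_le_mem _ _ _ (mem_J m j0 hj01 hj02 _)
              _ ≤ PySem.List.pyGetD r j0 0 +
                    Fsuf m rest (PySem.Int.mod (j0 + PySem.List.pyGetD row 1 0) m) :=
                  add_le_add (le_refl _) (Fsuf_cons_le_right m row rest j0 hg)
              _ = PySem.List.pyGetD r j0 0 + Fsuf m rest j := by rw [hmod]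

-- ===== B-side lemmas =====

theorem Fsuf_nonneg (m : Int) (items : List (List Int))
    (ha : ∀ r ∈ items, 0 ≤ PySem.List.pyGetD r 0 0) :
    ∀ j : Int, 0 ≤ Fsuf m items j := by
  induction items with
  | nil => intro j; exact le_refl 0
  | cons row rest ih =>
      intro j
      have ha0 : 0 ≤ PySem.List.pyGetD row 0 0 := ha row (List.mem_cons_self)
      have ih' := ih (fun r hr => ha r (List.mem_cons_of_mem _ hr))
      show 0 ≤ (if j + PySem.List.pyGetD row 1 0 < m then
          min (PySem.List.pyGetD row 0 0 + Fsuf m rest j)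
            (Fsuf m rest (PySem.Int.mod (j + PySem.List.pyGetD row 1 0) m))
        else PySem.List.pyGetD row 0 0 + Fsuf m rest j)
      split
      · exact le_min (add_nonneg ha0 (ih' j)) (ih' _)
      · exact add_nonneg ha0 (ih' j)

theorem PH_eq_n (n m : Int) (items : List (List Int))
    (ha : ∀ r ∈ items, 0 ≤ PySem.List.pyGetD r 0 0) :
    PH n m items = n := by
  induction items with
  | nil => rfl
  | cons row rest ih =>
      have ih' := ih (fun r hr => ha r (List.mem_cons_of_mem _ hr))
      show ((PySem.List.pyRange 0 m 1).map (fun j => n + Fsuf m rest j)).foldl min (PH n m rest) = n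
      apply le_antisymm
      · exact le_trans (foldl_min_le_init _ _) (le_of_eq ih')
      · apply le_foldl_min
        · rw [ih']
        · intro x hx
          obtain ⟨j, _, rfl⟩ := List.mem_map.mp hx
          have := Fsuf_nonneg m rest (fun r hr => ha r (List.mem_cons_of_mem _ hr)) j
          omega

-- the rolling row after processing `items` is exactly the suffix-DP row Fsuf
theorem bside_aux (m : Int) (hm : 0 < m) :
    ∀ items : List (List Int), (∀ r ∈ items, -m ≤ PySem.List.pyGetD r 1 0) →
      items.foldr (fun row f => altStep m f row) (List.replicate m.toNat 0) =
        (PySem.List.pyRange 0 m 1).map (fun j => Fsuf m items j) := by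
  intro items
  induction items with
  | nil =>
      intro _
      have h1 : (fun j => Fsuf m [] j) = (fun _ : Int => (0:Int)) := by
        funext j; rfl
      rw [h1, List.map_const', PySem.List.length_pyRange_one]
      norm_num
  | cons row rest ih =>
      intro hb
      have hb0 : -m ≤ PySem.List.pyGetD row 1 0 := hb row (List.mem_cons_self)
      rw [List.foldr_cons, ih (fun r hr => hb r (List.mem_cons_of_mem _ hr))]
      show (PySem.List.pyRange 0 m 1).map (fun j =>
          if j + PySem.List.pyGetD row 1 0 < m then
            min (PySem.List.pyGetD row 0 0 +
                  PySem.List.pyGetD ((PySem.List.pyRange 0 m 1).map (fun j => Fsuf m rest j)) j 0)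
                (PySem.List.pyGetD ((PySem.List.pyRange 0 m 1).map (fun j => Fsuf m rest j))
                  (j + PySem.List.pyGetD row 1 0) 0)
          else PySem.List.pyGetD row 0 0 +
                  PySem.List.pyGetD ((PySem.List.pyRange 0 m 1).map (fun j => Fsuf m rest j)) j 0) =
        (PySem.List.pyRange 0 m 1).map (fun j => Fsuf m (row :: rest) j)
      apply List.map_congr_left
      intro j hj
      obtain ⟨hj1, hj2⟩ := PySem.List.mem_pyRange_one.mp hj
      have hg1 : PySem.List.pyGetD ((PySem.List.pyRange 0 m 1).map (fun j => Fsuf m rest j)) j 0 =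
          Fsuf m rest j := PySem.List.pyGetD_map_pyRange_of_nonneg _ m j 0 hj1 hj2
      show _ = (if j + PySem.List.pyGetD row 1 0 < m then
          min (PySem.List.pyGetD row 0 0 + Fsuf m rest j)
            (Fsuf m rest (PySem.Int.mod (j + PySem.List.pyGetD row 1 0) m))
        else PySem.List.pyGetD row 0 0 + Fsuf m rest j)
      have hlenF : ((((PySem.List.pyRange 0 m 1).map (fun j => Fsuf m rest j)).length : Nat) : Int) = m := by
        rw [List.length_map, PySem.List.length_pyRange_one]; omega
      by_cases hgd : j + PySem.List.pyGetD row 1 0 < m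
      · rw [if_pos hgd, if_pos hgd, hg1,
            cell_wrap _ m (j + PySem.List.pyGetD row 1 0) hlenF hm (by omega) hgd,
            PySem.List.pyGetD_map_pyRange_of_nonneg _ m _ 0
              (PySem.Int.mod_nonneg _ hm) (PySem.Int.mod_lt _ hm)]
      · rw [if_neg hgd, if_neg hgd, hg1]

theorem main_eq (info : List (List Int)) (n m : Int) (hm : 0 < m)
    (hrows : ∀ r ∈ info, 2 ≤ r.length ∧ 0 ≤ r.getD 0 0 ∧ -m ≤ r.getD 1 0) :
    solution info n m = solution_alt info n m := by
  have hgetDa : ∀ r ∈ info, 0 ≤ PySem.List.pyGetD r 0 0 := by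
    intro r hr
    rw [PySem.List.pyGetD_of_nonneg _ _ (by omega : (0:Int) ≤ 0)]
    exact (hrows r hr).2.1
  have hgetDb : ∀ r ∈ info, -m ≤ PySem.List.pyGetD r 1 0 := by
    intro r hr
    rw [PySem.List.pyGetD_of_nonneg _ _ (by omega : (0:Int) ≤ 1)]
    exact (hrows r hr).2.2
  have hrowsA : ∀ r ∈ info, 2 ≤ r.length ∧ -m ≤ r.getD 1 0 := by
    intro r hr
    refine ⟨(hrows r hr).1, ?_⟩
    have := (hrows r hr).2.2
    omega
  obtain ⟨_, _, _, hchain⟩ :=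
    outer_aux info n m m.toNat (by omega) hm hrowsA info.length (le_refl _)
  -- A's final fold, characterised through the chain and the suffix DP
  have hAfold :
      (PySem.List.pyRange 0 m 1).foldl
        (fun answer j => min answer (dpGet
          ((PySem.List.pyRange 1 ((info.length : Int)+1) 1).foldl (outerStep info m)
            (dpSet ((PySem.List.pyRange 0 ((info.length : Int)+1) 1).map
              (fun _ => (PySem.List.pyRange 0 m 1).map (fun _ => n))) 0 0 0))
          (info.length : Int) j)) n =
      ((PySem.List.pyRange 0 m 1).map
        (fun j => (if j = 0 then (0:Int) else n) + Fsuf m info j)).foldl min (PH n m info) := by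
    rw [← List.foldl_map]
    rw [List.take_length] at hchain
    have hX := ex_lemma n m hm info _ _ hchain
    have hY : ((PySem.List.pyRange 0 m 1).map
        (fun j => PySem.List.pyGetD (PySem.List.pySetD ((PySem.List.pyRange 0 m 1).map
          (fun _ => n)) 0 0) j 0 + Fsuf m info j)) =
        ((PySem.List.pyRange 0 m 1).map
          (fun j => (if j = 0 then (0:Int) else n) + Fsuf m info j)) := by
      apply List.map_congr_left
      intro j hj
      obtain ⟨hj1, hj2⟩ := PySem.List.mem_pyRange_one.mp hj
      congr 1
      have hlenN : (((((PySem.List.pyRange 0 m 1).map (fun _ => n)).length : Nat)) : Int) = m := by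
        rw [rowN_len]; omega
      rw [cell_set _ m 0 j 0 hlenN hm (by omega) hm hj1 hj2, mod_id m 0 hm (le_refl _) hm]
      rcases eq_or_ne j 0 with h | h
      · rw [if_pos h, if_pos h]
      · rw [if_neg h, if_neg h, rowN_cell n m j hj1 hj2]
    rw [hY] at hX
    exact hX
  -- the A-fold equals min n F, where F is the suffix-DP value from B-total 0
  set F := Fsuf m info 0 with hF
  have hFmem : ((if (0:Int) = 0 then (0:Int) else n) + Fsuf m info 0) ∈
      (PySem.List.pyRange 0 m 1).map (fun j => (if j = 0 then (0:Int) else n) + Fsuf m info j) :=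
    mem_J m 0 (le_refl _) hm _
  have hPH := PH_eq_n n m info hgetDa
  have hAmin :
      ((PySem.List.pyRange 0 m 1).map
        (fun j => (if j = 0 then (0:Int) else n) + Fsuf m info j)).foldl min (PH n m info) =
      min n F := by
    apply le_antisymm
    · apply le_min
      · exact le_trans (foldl_min_le_init _ _) (le_of_eq hPH)
      · have := foldl_min_le_mem _ (PH n m info) _ hFmem
        simpa using this
    · apply le_foldl_min
      · rw [hPH]; exact min_le_left _ _
      · intro x hx
        obtain ⟨j, hjmem, rfl⟩ := List.mem_map.mp hx
        obtain ⟨hj1, hj2⟩ := PySem.List.mem_pyRange_one.mp hjmem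
        rcases eq_or_ne j 0 with h | h
        · subst h
          rw [if_pos rfl, zero_add, ← hF]
          exact min_le_right _ _
        · rw [if_neg h]
          have := Fsuf_nonneg m info hgetDa j
          have h2 : min n F ≤ n := min_le_left _ _
          omega
  -- B's answer is F
  have hBrow : info.reverse.foldl (altStep m) (List.replicate m.toNat 0) =
      (PySem.List.pyRange 0 m 1).map (fun j => Fsuf m info j) := by
    rw [List.foldl_reverse]
    exact bside_aux m hm info hgetDb
  have hBans : PySem.List.pyGetD (info.reverse.foldl (altStep m) (List.replicate m.toNat 0)) 0 0
      = F := by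
    rw [hBrow]
    exact PySem.List.pyGetD_map_pyRange_of_nonneg _ m 0 0 (le_refl _) hm
  show (if ((PySem.List.pyRange 0 m 1).foldl
        (fun answer j => min answer (dpGet
          ((PySem.List.pyRange 1 (((info.length : Int))+1) 1).foldl (outerStep info m)
            (dpSet ((PySem.List.pyRange 0 (((info.length : Int))+1) 1).map
              (fun _ => (PySem.List.pyRange 0 m 1).map (fun _ => n))) 0 0 0))
          ((info.length : Int)) j)) n) ≥ n then (-1:Int)
      else ((PySem.List.pyRange 0 m 1).foldl
        (fun answer j => min answer (dpGet
          ((PySem.List.pyRange 1 (((info.length : Int))+1) 1).foldl (outerStep info m)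
            (dpSet ((PySem.List.pyRange 0 (((info.length : Int))+1) 1).map
              (fun _ => (PySem.List.pyRange 0 m 1).map (fun _ => n))) 0 0 0))
          ((info.length : Int)) j)) n)) =
    (if (PySem.List.pyGetD (info.reverse.foldl (altStep m) (List.replicate m.toNat 0)) 0 0) ≥ n
      then (-1:Int)
      else (PySem.List.pyGetD (info.reverse.foldl (altStep m) (List.replicate m.toNat 0)) 0 0))
  rw [hAfold, hAmin, hBans]
  by_cases h : F ≥ n
  · rw [if_pos h, if_pos (by omega : min n F ≥ n)]
  · rw [if_neg h, if_neg (by omega : ¬ min n F ≥ n), min_eq_right (by omega)]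

-- ===== VERDICT =====
theorem solution_spec : Claim_equal_solution := by
  intro info n m _ hpre
  unfold Spec_solution
  exact main_eq info n m hpre.1 hpre.2
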